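-- pv_equiv track=rewrite | github.com/usandissm/PrippiStream | platformcode/netflixhome.py | _strip_html_fields
-- ===== SOURCE A (Python) =====
-- def _strip_html_fields(s):
--     """
--     Remove "html":"..." JSON string values that contain SVG with unescaped ".
--     The real JSON-closing " is identified by being followed by , } or ].
--     SVG attribute " chars are followed by HTML chars (letters, /, >, backslash) not those.
--     """
--     result = []
--     i = 0
--     field = '"html":"'
--     flen = len(field)
--     while i < len(s):
--         if s[i:i + flen] == field:
--             result.append('"html":""')
--             i += flen
--             while i < len(s):
--                 c = s[i]
--                 if c == '\\' and i + 1 < len(s):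
--                     i += 2          # valid JSON escape, skip both chars
--                 elif c == '"':
--                     j = i + 1
--                     while j < len(s) and s[j] in ' \t\r\n':
--                         j += 1
--                     if j < len(s) and s[j] in ',}]':
--                         i += 1      # real JSON-closing "
--                         break
--                     else:
--                         i += 1      # bare " inside SVG, skip
--                 else:
--                     i += 1
--         else:
--             result.append(s[i])
--             i += 1
--     return ''.join(result)
-- ===== SOURCE B (Python) =====
-- FIELD = '"html":"'
--
--
-- def _skip_value(s, i):
--     """Return the index just past the html value that starts at i.
--
--     Jumps between quote characters with str.find instead of stepping char by
--     char; a quote preceded by an odd-length backslash run (within the value)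
--     is escaped.
--     """
--     n = len(s)
--     while True:
--         q = s.find('"', i)
--         if q == -1:
--             return n
--         b = q
--         while b > i and s[b - 1] == '\\':
--             b -= 1
--         if (q - b) % 2 == 1:
--             i = q + 1           # escaped quote
--             continue
--         t = s[q + 1:].lstrip(' \t\r\n')
--         if t.startswith((',', '}', ']')):
--             return q + 1        # real JSON-closing quote
--         i = q + 1               # bare quote inside SVG
--
--
-- def _strip_html_fields(s):
--     out = []
--     i = 0
--     while True:
--         k = s.find(FIELD, i)
--         if k == -1:
--             out.append(s[i:])
--             break
--         out.append(s[i:k])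
--         out.append('"html":""')
--         i = _skip_value(s, k + len(FIELD))
--     return ''.join(out)
-- ===== Notes on version B (the rewrite author's own statement) =====
-- stated objective: faster
-- what changed: A's char-by-char outer copy loop and pair-stepping inner escape scanner are replaced by str.find jumps: the outer loop jumps straight to the next marker occurrence and copies slices, and the value skipper jumps from quote to quote, deciding escapedness by the parity of the preceding backslash run and closedness by lstrip+startswith.
import Mathlib
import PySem

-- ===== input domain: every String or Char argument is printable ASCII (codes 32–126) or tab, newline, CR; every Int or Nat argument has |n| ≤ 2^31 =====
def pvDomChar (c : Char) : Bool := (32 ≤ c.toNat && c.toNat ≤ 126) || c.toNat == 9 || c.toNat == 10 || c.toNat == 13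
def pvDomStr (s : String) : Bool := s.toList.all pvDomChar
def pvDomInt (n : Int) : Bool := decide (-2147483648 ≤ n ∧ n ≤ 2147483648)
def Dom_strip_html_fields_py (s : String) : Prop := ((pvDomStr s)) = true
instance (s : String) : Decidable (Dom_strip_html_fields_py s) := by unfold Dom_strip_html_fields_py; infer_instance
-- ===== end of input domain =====

-- B replaces A's char-by-char outer copy loop and pair-stepping escape scanner by
-- str.find jumps between marker/quote occurrences plus a backslash-run parity test
-- (objective: faster by a constant factor — find/slicing instead of a per-char loop).

-- the char classes both Pythons spell as literal strings: ' \t\r\n' and ',}]'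
def pvIsWs (c : Char) : Bool := c = ' ' || c = '\t' || c = '\r' || c = '\n'
def pvIsDelim (c : Char) : Bool := c = ',' || c = '}' || c = ']'
def pvField : List Char := ['"', 'h', 't', 'm', 'l', '"', ':', '"']
def pvBlank : List Char := ['"', 'h', 't', 'm', 'l', '"', ':', '"', '"']

-- tiny named arithmetic facts (keep the ports' embedded proof terms small)
theorem pvDecStep (n j k : Nat) (h : j < n) (hk : j < k) : n - k < n - j :=
  Nat.sub_lt_sub_left h hk
theorem pvPredDec (b : Nat) (h : 0 < b) : b - 1 < b := Nat.sub_lt h Nat.one_pos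
theorem pvLt1 (i : Nat) : i < i + 1 := Nat.lt_succ_self i
theorem pvLt2 (i : Nat) : i < i + 2 := Nat.lt_add_of_pos_right (by decide)
theorem pvNeNegOne {a : Int} (h : 0 ≤ a) : a ≠ -1 := by
  intro hc
  rw [hc] at h
  exact absurd h (by decide)
theorem pvNonneg {a : Int} (h1 : -1 ≤ a) (h2 : a ≠ -1) : 0 ≤ a := by
  simpa using Int.add_one_le_iff.mpr (lt_of_le_of_ne h1 (Ne.symm h2))
theorem pvToNatAdd (i : Nat) (f : Int) (hf : 0 ≤ f) :
    ((i : Int) + f).toNat = i + f.toNat := by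
  rw [Int.toNat_add (Int.natCast_nonneg i) hf, Int.toNat_natCast]
theorem pvFactsArith (n i ft sl : Nat) (h1 : sl ≤ n - i - ft) (h2 : 1 ≤ sl)
    (h3 : ¬ n < i) : i ≤ n ∧ i ≤ i + ft ∧ i + ft + sl ≤ n := by
  rw [Nat.sub_sub] at h1
  refine ⟨Nat.le_of_not_lt h3, Nat.le_add_right i ft, ?_⟩
  have h4 : i + ft ≤ n :=
    Nat.le_of_lt (Nat.lt_of_sub_pos (lt_of_lt_of_le h2 h1))
  rw [Nat.add_comm (i + ft) sl]
  exact Nat.add_le_of_le_sub h4 h1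
theorem pvDecSkip (n i q : Nat) (h2 : i ≤ q) (h3 : q + 1 ≤ n) :
    n + 1 - (q + 1) < n + 1 - i :=
  Nat.sub_lt_sub_left (Nat.lt_succ_of_le (le_trans h2 (Nat.le_of_succ_le h3)))
    (Nat.lt_succ_of_le h2)
theorem pvDecOuter (n i k sk : Nat) (h2 : i ≤ k) (h3 : k + 8 ≤ n) (h4 : k + 8 ≤ sk) :
    n + 1 - sk < n + 1 - i :=
  Nat.sub_lt_sub_left
    (Nat.lt_succ_of_le (le_trans (le_trans h2 (Nat.le_add_right k 8)) h3))
    (lt_of_lt_of_le (lt_of_le_of_lt h2 (Nat.lt_add_of_pos_right (by decide))) h4)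
theorem pvDecFuel (n i t : Nat) (h : i ≤ n) : n + 1 - (i + t + 1) < n + 1 - i :=
  Nat.sub_lt_sub_left (Nat.lt_succ_of_le h) (Nat.lt_succ_of_le (Nat.le_add_right i t))
theorem pvLtLen (n i ft : Nat) (h : ft < n - i) : i + ft < n := by
  rw [Nat.add_comm]
  exact Nat.add_lt_of_lt_sub h

-- ===== PORT A =====
-- inner lookahead: while j < len(s) and s[j] in ' \t\r\n': j += 1
def pvLookJ (s : List Char) (j : Nat) : Nat :=
  if h : j < s.length then
    if pvIsWs s[j] then pvLookJ s (j + 1) else j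
  else j
termination_by s.length - j
decreasing_by exact pvDecStep s.length j (j + 1) h (by omega)

-- A's inner while loop; returns the value of i when the loop exits
def pvInnerA (s : List Char) (i : Nat) : Nat :=
  if h : i < s.length then
    if s[i] = '\\' ∧ i + 1 < s.length then pvInnerA s (i + 2)
    else if s[i] = '"' then
      let j := pvLookJ s (i + 1)
      if hj : j < s.length then
        if pvIsDelim s[j] then i + 1
        else pvInnerA s (i + 1)
      else pvInnerA s (i + 1)
    else pvInnerA s (i + 1)
  else i
termination_by s.length - i
decreasing_by
  · exact pvDecStep s.length i (i + 2) h (by omega)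
  · exact pvDecStep s.length i (i + 1) h (by omega)
  · exact pvDecStep s.length i (i + 1) h (by omega)
  · exact pvDecStep s.length i (i + 1) h (by omega)

theorem pvInnerA_ge (s : List Char) (i : Nat) : i ≤ pvInnerA s i := by
  rw [pvInnerA]
  dsimp only
  split
  · split
    · exact le_trans (Nat.le_add_right i 2) (pvInnerA_ge s (i + 2))
    · split
      · split
        · split
          · exact Nat.le_add_right i 1
          · exact le_trans (Nat.le_add_right i 1) (pvInnerA_ge s (i + 1))
        · exact le_trans (Nat.le_add_right i 1) (pvInnerA_ge s (i + 1))
      · exact le_trans (Nat.le_add_right i 1) (pvInnerA_ge s (i + 1))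
  · exact le_rfl
termination_by s.length - i
decreasing_by
  all_goals first
    | exact pvDecStep s.length i (i + 2) (by assumption) (pvLt2 i)
    | exact pvDecStep s.length i (i + 1) (by assumption) (pvLt1 i)

theorem pvOuterA_dec (s : List Char) (i : Nat) (h : i < s.length) :
    s.length - pvInnerA s (i + 8) < s.length - i :=
  Nat.sub_lt_sub_left h
    (lt_of_lt_of_le (Nat.lt_add_of_pos_right (by decide)) (pvInnerA_ge s (i + 8)))

-- A's outer while loop
def pvOuterA (s : List Char) (i : Nat) : List Char :=
  if h : i < s.length then
    if PySem.List.slice s (some (i : Int)) (some ((i : Int) + 8)) = pvField then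
      pvBlank ++ pvOuterA s (pvInnerA s (i + 8))
    else s[i] :: pvOuterA s (i + 1)
  else []
termination_by s.length - i
decreasing_by
  · exact pvOuterA_dec s i h
  · exact pvDecStep s.length i (i + 1) h (by omega)

def strip_html_fields_py (s : String) : String := String.ofList (pvOuterA s.toList 0)

-- ===== PORT B =====
-- findFrom with a Nat start, written out (needed for the port's own termination)
theorem pvFindFrom_nat (s sub : List Char) (i : Nat) :
    PySem.Chars.findFrom s sub (i : Int) none =
      if s.length < i then -1
      else if PySem.Chars.find (s.drop i) sub = -1 then -1
      else (i : Int) + PySem.Chars.find (s.drop i) sub := by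
  unfold PySem.Chars.findFrom
  have h0 : ¬ ((i : Int) < 0) := Int.not_lt.mpr (Int.natCast_nonneg i)
  simp only [if_neg h0, Int.toNat_natCast, List.take_length, Nat.cast_lt]

theorem pvFind_nonempty_facts (s sub : List Char) (i : Nat)
    (hne : sub ≠ []) (hq : PySem.Chars.findFrom s sub (i : Int) none ≠ -1) :
    i ≤ s.length ∧ i ≤ (PySem.Chars.findFrom s sub (i : Int) none).toNat ∧
      (PySem.Chars.findFrom s sub (i : Int) none).toNat + sub.length ≤ s.length := by
  rw [pvFindFrom_nat] at hq ⊢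
  by_cases hle : s.length < i
  · rw [if_pos hle] at hq
    exact absurd rfl hq
  · rw [if_neg hle] at hq ⊢
    by_cases hf : PySem.Chars.find (s.drop i) sub = -1
    · rw [if_pos hf] at hq
      exact absurd rfl hq
    · have hf0 : 0 ≤ PySem.Chars.find (s.drop i) sub :=
        pvNonneg (PySem.Chars.neg_one_le_find (s.drop i) sub) hf
      have hspec := PySem.Chars.find_spec (s := s.drop i) (sub := sub) hf0
      have hlen := hspec.1.length_le
      rw [List.length_drop, List.length_drop] at hlen
      have hsub : 1 ≤ sub.length := by
        cases sub with
        | nil => exact absurd rfl hne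
        | cons a t => exact Nat.succ_le_succ (Nat.zero_le _)
      rw [if_neg hf, pvToNatAdd i _ hf0]
      exact pvFactsArith s.length i (PySem.Chars.find (s.drop i) sub).toNat sub.length
        hlen hsub hle

theorem pvSkipB_dec (s : List Char) (i : Nat)
    (hq : PySem.Chars.findFrom s ['"'] (i : Int) none ≠ -1) :
    s.length + 1 - ((PySem.Chars.findFrom s ['"'] (i : Int) none).toNat + 1) <
      s.length + 1 - i := by
  obtain ⟨h1, h2, h3⟩ := pvFind_nonempty_facts s ['"'] i (by decide) hq
  exact pvDecSkip s.length i _ h2 h3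

-- number of consecutive backslashes immediately before b, not reaching before i
def pvBsRun (s : List Char) (i b : Nat) : Nat :=
  if h : i < b ∧ s[b - 1]? = some '\\' then pvBsRun s i (b - 1) + 1 else 0
termination_by b
decreasing_by exact pvPredDec b (by omega)

-- B's _skip_value: jump to the next '"' with find; parity of the backslash run
-- decides escapedness; lstrip+startswith decides whether it closes the field
def pvSkipB (s : List Char) (i : Nat) : Nat :=
  let q := PySem.Chars.findFrom s ['"'] (i : Int) none
  if hq : q = -1 then s.length
  else
    if pvBsRun s i q.toNat % 2 = 1 then pvSkipB s (q.toNat + 1)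
    else
      -- hand port of s[q+1:].lstrip(' \t\r\n') as drop + dropWhile (exact: ASCII char class)
      let t := (s.drop (q.toNat + 1)).dropWhile pvIsWs
      if PySem.Chars.startswith t [','] || PySem.Chars.startswith t ['}'] ||
          PySem.Chars.startswith t [']'] then q.toNat + 1
      else pvSkipB s (q.toNat + 1)
termination_by s.length + 1 - i
decreasing_by
  all_goals
    have hq : PySem.Chars.findFrom s ['"'] (i : Int) none ≠ -1 := by assumption
    exact pvSkipB_dec s i hq

theorem pvFindQ_lt (s : List Char) (i : Nat)
    (hf : PySem.Chars.find (s.drop i) ['"'] ≠ -1) :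
    0 ≤ PySem.Chars.find (s.drop i) ['"'] ∧
      i + (PySem.Chars.find (s.drop i) ['"']).toNat < s.length := by
  have hf0 : 0 ≤ PySem.Chars.find (s.drop i) ['"'] :=
    pvNonneg (PySem.Chars.neg_one_le_find (s.drop i) ['"']) hf
  refine ⟨hf0, ?_⟩
  have hspec := PySem.Chars.find_spec (s := s.drop i) (sub := ['"']) hf0
  have hne : (s.drop i).drop (PySem.Chars.find (s.drop i) ['"']).toNat ≠ [] := by
    intro hcon
    rw [hcon] at hspec
    simp at hspec
  have hlt : (PySem.Chars.find (s.drop i) ['"']).toNat < (s.drop i).length :=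
    Nat.lt_of_not_le (fun hcon => hne (List.drop_eq_nil_of_le hcon))
  rw [List.length_drop] at hlt
  exact pvLtLen s.length i _ hlt

theorem pvSkipB_bounds (s : List Char) (i : Nat) :
    (i ≤ s.length → i ≤ pvSkipB s i) ∧ pvSkipB s i ≤ s.length := by
  rw [pvSkipB]
  dsimp only
  rw [pvFindFrom_nat]
  by_cases hle : s.length < i
  · rw [if_pos hle]
    exact ⟨fun h => h, le_rfl⟩
  · rw [if_neg hle]
    by_cases hf : PySem.Chars.find (s.drop i) ['"'] = -1
    · rw [if_pos hf]
      exact ⟨fun h => h, le_rfl⟩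
    · obtain ⟨hf0, hlt⟩ := pvFindQ_lt s i hf
      rw [if_neg hf, dif_neg (pvNeNegOne (by exact Int.add_nonneg (Int.natCast_nonneg i) hf0)),
        pvToNatAdd i _ hf0]
      have hq1 : i + (PySem.Chars.find (s.drop i) ['"']).toNat + 1 ≤ s.length :=
        Nat.succ_le_of_lt hlt
      have hrec := pvSkipB_bounds s (i + (PySem.Chars.find (s.drop i) ['"']).toNat + 1)
      have hii : i ≤ i + (PySem.Chars.find (s.drop i) ['"']).toNat + 1 :=
        le_trans (Nat.le_add_right i _) (Nat.le_add_right _ 1)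
      constructor
      · intro _
        split
        · exact le_trans hii (hrec.1 hq1)
        · split
          · exact hii
          · exact le_trans hii (hrec.1 hq1)
      · split
        · exact hrec.2
        · split
          · exact hq1
          · exact hrec.2
termination_by s.length + 1 - i
decreasing_by all_goals exact pvDecFuel s.length i _ (Nat.le_of_not_lt hle)

theorem pvSkipB_ge (s : List Char) (i : Nat) (hi : i ≤ s.length) : i ≤ pvSkipB s i :=
  (pvSkipB_bounds s i).1 hi

theorem pvOuterB_dec (s : List Char) (i : Nat)
    (hk : PySem.Chars.findFrom s pvField (i : Int) none ≠ -1) :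
    s.length + 1 - pvSkipB s ((PySem.Chars.findFrom s pvField (i : Int) none).toNat + 8) <
      s.length + 1 - i := by
  obtain ⟨h1, h2, h3⟩ := pvFind_nonempty_facts s pvField i (by decide) hk
  rw [(by decide : pvField.length = 8)] at h3
  have hge := pvSkipB_ge s ((PySem.Chars.findFrom s pvField (i : Int) none).toNat + 8) h3
  exact pvDecOuter s.length i _ _ h2 h3 hge

-- B's _strip_html_fields: jump to the next marker occurrence with find, copy slices
def pvOuterB (s : List Char) (i : Nat) : List Char :=
  let k := PySem.Chars.findFrom s pvField (i : Int) none
  if hk : k = -1 then PySem.List.slice s (some (i : Int)) none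
  else PySem.List.slice s (some (i : Int)) (some k) ++ pvBlank ++
       pvOuterB s (pvSkipB s (k.toNat + 8))
termination_by s.length + 1 - i
decreasing_by
  have hk : PySem.Chars.findFrom s pvField (i : Int) none ≠ -1 := by assumption
  exact pvOuterB_dec s i hk

def strip_html_fields_py_alt (s : String) : String := String.ofList (pvOuterB s.toList 0)

-- ===== PRECONDITION & SPEC =====
def Spec_strip_html_fields_py (s : String) (out : String) : Prop := out = strip_html_fields_py_alt s
instance (s : String) (out : String) : Decidable (Spec_strip_html_fields_py s out) := by unfold Spec_strip_html_fields_py; infer_instance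

-- ===== CLAIM (what is proved, stated in full; the proofs are below) =====
def Claim_equal_strip_html_fields_py : Prop := ∀ (s : String), Dom_strip_html_fields_py s → Spec_strip_html_fields_py s (strip_html_fields_py s)

-- ===== LEMMAS AND PROOFS =====

theorem pvSkipB_le (s : List Char) (i : Nat) : pvSkipB s i ≤ s.length :=
  (pvSkipB_bounds s i).2

-- --- small utilities -------------------------------------------------------

theorem pvPrefix_single {c : Char} {l : List Char} : [c] <+: l ↔ l.head? = some c := by
  cases l with
  | nil => simp
  | cons a t => simp [List.cons_prefix_cons, eq_comm]

theorem pvPrefix_single_drop {c : Char} {s : List Char} {j : Nat} :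
    [c] <+: s.drop j ↔ s[j]? = some c := by
  rw [pvPrefix_single, List.head?_drop]

theorem pvDropWhile_eq_drop (p : Char → Bool) (l : List Char) :
    l.dropWhile p = l.drop (l.takeWhile p).length := by
  induction l with
  | nil => simp
  | cons a t ih => by_cases h : p a <;> simp [h, ih]

theorem pvNoPrefix_of_not_infix {sub s : List Char} {i j : Nat}
    (h : ¬ sub <:+: s.drop i) (hij : i ≤ j) : ¬ sub <+: s.drop j := by
  intro hp
  apply h
  have : s.drop j = (s.drop i).drop (j - i) := by rw [List.drop_drop]; congr 1; omega
  rw [this] at hp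
  exact hp.isInfix.trans (List.drop_suffix _ _).isInfix

-- first occurrence of `sub` at position ≥ i, from findFrom (i ≤ s.length)
theorem pvFindFrom_cases (s sub : List Char) (i : Nat) (hi : i ≤ s.length) :
    (PySem.Chars.findFrom s sub (i : Int) none = -1 ∧ ∀ j, i ≤ j → ¬ sub <+: s.drop j) ∨
    (∃ q : Nat, PySem.Chars.findFrom s sub (i : Int) none = (q : Int) ∧ i ≤ q ∧
      sub <+: s.drop q ∧ ∀ j, i ≤ j → j < q → ¬ sub <+: s.drop j) := by
  rw [pvFindFrom_nat]
  have hle : ¬ s.length < i := by omega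
  rw [if_neg hle]
  by_cases hf : PySem.Chars.find (s.drop i) sub = -1
  · left
    refine ⟨by rw [if_pos hf], fun j hj => ?_⟩
    rw [PySem.Chars.find_eq_neg_one_iff] at hf
    exact pvNoPrefix_of_not_infix hf hj
  · right
    have hf0 : 0 ≤ PySem.Chars.find (s.drop i) sub := by
      have := PySem.Chars.neg_one_le_find (s.drop i) sub
      omega
    obtain ⟨hpre, hmin⟩ := PySem.Chars.find_spec (s := s.drop i) (sub := sub) hf0
    refine ⟨i + (PySem.Chars.find (s.drop i) sub).toNat, ?_, by omega, ?_, ?_⟩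
    · rw [if_neg hf]; omega
    · rwa [List.drop_drop] at hpre
    · intro j hj hjq
      have := hmin (j - i) (by omega)
      rw [List.drop_drop] at this
      have hji : i + (j - i) = j := by omega
      rwa [hji] at this

-- --- step lemmas for A's inner scanner ------------------------------------

theorem pvInnerA_stop (s : List Char) (i : Nat) (h : s.length ≤ i) : pvInnerA s i = i := by
  unfold pvInnerA
  rw [dif_neg (by omega)]

theorem pvInnerA_esc (s : List Char) (i : Nat) (h : i < s.length)
    (hc : s[i]? = some '\\') (h1 : i + 1 < s.length) : pvInnerA s i = pvInnerA s (i + 2) := by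
  rw [List.getElem?_eq_getElem h] at hc
  conv_lhs => rw [pvInnerA]
  rw [dif_pos h, if_pos ⟨by simpa using hc, h1⟩]

theorem pvInnerA_plain (s : List Char) (i : Nat) (h : i < s.length)
    (hq : s[i]? ≠ some '"') (hb : s[i]? = some '\\' → ¬ i + 1 < s.length) :
    pvInnerA s i = pvInnerA s (i + 1) := by
  rw [List.getElem?_eq_getElem h] at hq hb
  conv_lhs => rw [pvInnerA]
  rw [dif_pos h]
  dsimp only
  rw [if_neg (by intro hc; exact hb (by simpa using hc.1) hc.2),
      if_neg (by intro hc; exact hq (by simpa using hc))]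

-- what A does when it examines an unescaped quote
def pvQuoteStep (s : List Char) (i : Nat) : Nat :=
  let j := pvLookJ s (i + 1)
  if hj : j < s.length then
    if pvIsDelim s[j] then i + 1 else pvInnerA s (i + 1)
  else pvInnerA s (i + 1)

theorem pvInnerA_quote (s : List Char) (i : Nat) (h : i < s.length)
    (hc : s[i]? = some '"') : pvInnerA s i = pvQuoteStep s i := by
  rw [List.getElem?_eq_getElem h] at hc
  have hc' : s[i] = '"' := by simpa using hc
  conv_lhs => rw [pvInnerA]
  unfold pvQuoteStep
  rw [dif_pos h]
  dsimp only
  rw [if_neg (by intro hcc; rw [hc'] at hcc; exact absurd hcc.1 (by decide)), if_pos hc']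

-- --- A's lookahead loop = takeWhile/dropWhile ------------------------------

theorem pvLookJ_eq (s : List Char) (m : Nat) :
    pvLookJ s m = m + ((s.drop m).takeWhile pvIsWs).length := by
  unfold pvLookJ
  split
  · rename_i h
    rw [List.drop_eq_getElem_cons h, List.takeWhile_cons]
    split
    · rw [pvLookJ_eq s (m + 1)]
      simp; omega
    · simp
  · rename_i h
    rw [List.drop_eq_nil_of_le (by omega)]
    simp
termination_by s.length - m

theorem pvDrop_lookJ (s : List Char) (m : Nat) :
    s.drop (pvLookJ s m) = (s.drop m).dropWhile pvIsWs := by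
  rw [pvLookJ_eq, pvDropWhile_eq_drop, ← List.drop_drop]

-- A's close test at an examined quote q equals B's lstrip+startswith test
theorem pvClose_iff (s : List Char) (q : Nat) :
    (pvQuoteStep s q = q + 1 ∧
      ((PySem.Chars.startswith ((s.drop (q + 1)).dropWhile pvIsWs) [','] ||
        PySem.Chars.startswith ((s.drop (q + 1)).dropWhile pvIsWs) ['}'] ||
        PySem.Chars.startswith ((s.drop (q + 1)).dropWhile pvIsWs) [']']) = true)) ∨
    (pvQuoteStep s q = pvInnerA s (q + 1) ∧
      ((PySem.Chars.startswith ((s.drop (q + 1)).dropWhile pvIsWs) [','] ||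
        PySem.Chars.startswith ((s.drop (q + 1)).dropWhile pvIsWs) ['}'] ||
        PySem.Chars.startswith ((s.drop (q + 1)).dropWhile pvIsWs) [']']) = false)) := by
  have hdw : (s.drop (q + 1)).dropWhile pvIsWs = s.drop (pvLookJ s (q + 1)) :=
    (pvDrop_lookJ s (q + 1)).symm
  rw [hdw]
  unfold pvQuoteStep
  by_cases h : pvLookJ s (q + 1) < s.length
  · rw [dif_pos h]
    by_cases hd : pvIsDelim s[pvLookJ s (q + 1)]
    · left
      refine ⟨by rw [if_pos hd], ?_⟩
      revert hd
      unfold pvIsDelim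
      simp [PySem.Chars.startswith_iff, pvPrefix_single_drop, List.getElem?_eq_getElem h]
    · right
      refine ⟨by rw [if_neg hd], ?_⟩
      revert hd
      unfold pvIsDelim
      simp [Bool.eq_false_iff, PySem.Chars.startswith_iff, pvPrefix_single_drop,
        List.getElem?_eq_getElem h]
  · rw [dif_neg h]
    right
    refine ⟨rfl, ?_⟩
    rw [List.drop_eq_nil_of_le (by omega)]
    simp [Bool.eq_false_iff, PySem.Chars.startswith_iff]

-- --- backslash runs --------------------------------------------------------

-- A scans a pure backslash run [b,q) ending at a quote q: parity decides
theorem pvRun_scan (s : List Char) (q : Nat) (hq : q < s.length) (hcq : s[q]? = some '"') :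
    ∀ d b, q - b ≤ d → b ≤ q → (∀ j, b ≤ j → j < q → s[j]? = some '\\') →
      pvInnerA s b = if (q - b) % 2 = 0 then pvQuoteStep s q else pvInnerA s (q + 1) := by
  intro d
  induction d with
  | zero =>
    intro b h1 h2 _
    have hbq : b = q := by omega
    subst hbq
    rw [pvInnerA_quote s b (by omega) hcq]
    simp
  | succ d ih =>
    intro b h1 h2 h3
    by_cases hbq : b = q
    · subst hbq
      rw [pvInnerA_quote s b (by omega) hcq]
      simp
    · have hbl : b < q := by omega
      have hbs : s[b]? = some '\\' := h3 b le_rfl hbl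
      rw [pvInnerA_esc s b (by omega) hbs (by omega)]
      by_cases h2q : b + 1 = q
      · have hb2 : b + 2 = q + 1 := by omega
        rw [hb2]
        have hodd : ¬ (q - b) % 2 = 0 := by omega
        rw [if_neg hodd]
      · have hb2 : b + 2 ≤ q := by omega
        rw [ih (b + 2) (by omega) hb2 (fun j hj hjq => h3 j (by omega) hjq)]
        have : (q - (b + 2)) % 2 = (q - b) % 2 := by omega
        rw [this]

-- A copies over non-quote chars up to a position not jumpable-over
theorem pvCopy_scan (s : List Char) (b : Nat) (hbn : b ≤ s.length)
    (hpred : b = s.length ∨ s[b - 1]? ≠ some '\\') :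
    ∀ d p, b - p ≤ d → p ≤ b → (∀ j, p ≤ j → j < b → s[j]? ≠ some '"') →
      pvInnerA s p = pvInnerA s b := by
  intro d
  induction d with
  | zero =>
    intro p h1 h2 _
    have : p = b := by omega
    rw [this]
  | succ d ih =>
    intro p h1 h2 h3
    by_cases hpb : p = b
    · rw [hpb]
    · have hpl : p < b := by omega
      have hpn : p < s.length := by omega
      have hnq : s[p]? ≠ some '"' := h3 p le_rfl hpl
      by_cases hesc : s[p]? = some '\\' ∧ p + 1 < s.length
      · have hp2 : p + 2 ≤ b := by
          by_contra hcon
          have hp1 : p + 1 = b := by omega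
          rcases hpred with he | he
          · omega
          · apply he
            rw [← hp1]
            simpa using hesc.1
        rw [pvInnerA_esc s p hpn hesc.1 hesc.2]
        exact ih (p + 2) (by omega) hp2 (fun j hj hjq => h3 j (by omega) hjq)
      · rw [pvInnerA_plain s p hpn hnq (fun hc hc1 => hesc ⟨hc, hc1⟩)]
        exact ih (p + 1) (by omega) (by omega) (fun j hj hjq => h3 j (by omega) hjq)

-- pvBsRun finds the maximal backslash run before q that starts at or after i
theorem pvBsRun_spec (s : List Char) :
    ∀ q i, i ≤ q →
      pvBsRun s i q ≤ q - i ∧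
      (∀ j, q - pvBsRun s i q ≤ j → j < q → s[j]? = some '\\') ∧
      (q - pvBsRun s i q = i ∨ s[q - pvBsRun s i q - 1]? ≠ some '\\') := by
  intro q
  induction q using Nat.strong_induction_on with
  | _ q ih =>
    intro i hiq
    rw [pvBsRun]
    split
    · rename_i h
      obtain ⟨h1, h2⟩ := h
      obtain ⟨ih1, ih2, ih3⟩ := ih (q - 1) (by omega) i (by omega)
      refine ⟨by omega, ?_, ?_⟩
      · intro j hj1 hj2
        by_cases hjq : j = q - 1
        · rw [hjq]; exact h2
        · exact ih2 j (by omega) (by omega)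
      · have harith : q - (pvBsRun s i (q - 1) + 1) = (q - 1) - pvBsRun s i (q - 1) := by
          omega
        rw [harith]
        exact ih3
    · rename_i h
      rw [Decidable.not_and_iff_or_not] at h
      refine ⟨by omega, fun j hj1 hj2 => by omega, ?_⟩
      rcases h with h | h
      · left; omega
      · right; simpa using h

-- --- unfolding pvSkipB one step --------------------------------------------

theorem pvSkipB_eq_neg (s : List Char) (i : Nat)
    (hq : PySem.Chars.findFrom s ['"'] (i : Int) none = -1) : pvSkipB s i = s.length := by
  rw [pvSkipB]
  dsimp only
  rw [hq, dif_pos rfl]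

theorem pvSkipB_eq_pos (s : List Char) (i q : Nat)
    (hq : PySem.Chars.findFrom s ['"'] (i : Int) none = (q : Int)) :
    pvSkipB s i =
      if pvBsRun s i q % 2 = 1 then pvSkipB s (q + 1)
      else
        if PySem.Chars.startswith ((s.drop (q + 1)).dropWhile pvIsWs) [','] ||
            PySem.Chars.startswith ((s.drop (q + 1)).dropWhile pvIsWs) ['}'] ||
            PySem.Chars.startswith ((s.drop (q + 1)).dropWhile pvIsWs) [']'] then q + 1
        else pvSkipB s (q + 1) := by
  rw [pvSkipB]
  dsimp only
  rw [hq, dif_neg (by omega : ¬ (q : Int) = -1)]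
  simp only [Int.toNat_natCast]

-- --- the inner loops agree -------------------------------------------------

theorem pv_main_inner (s : List Char) : ∀ d i, i ≤ s.length → s.length - i ≤ d →
    pvInnerA s i = pvSkipB s i := by
  intro d
  induction d with
  | zero =>
    intro i hi hd
    have hin : i = s.length := by omega
    subst hin
    rw [pvInnerA_stop s _ le_rfl]
    rcases pvFindFrom_cases s ['"'] s.length le_rfl with ⟨hq, _⟩ | ⟨q, hq, hge, hpre, _⟩
    · rw [pvSkipB_eq_neg s _ hq]
    · exfalso
      rw [pvPrefix_single_drop] at hpre
      have := (List.getElem?_eq_some_iff.mp hpre).1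
      omega
  | succ d ih =>
    intro i hi hd
    rcases pvFindFrom_cases s ['"'] i hi with ⟨hq, hnone⟩ | ⟨q, hq, hge, hpre, hmin⟩
    · -- no quote at or after i: A scans to the end, B returns len(s)
      rw [pvSkipB_eq_neg s _ hq]
      have hnq : ∀ j, i ≤ j → j < s.length → s[j]? ≠ some '"' := by
        intro j hj _ hc
        exact hnone j hj (pvPrefix_single_drop.mpr hc)
      rw [pvCopy_scan s s.length le_rfl (Or.inl rfl) (s.length - i) i (by omega) hi hnq]
      exact pvInnerA_stop s _ le_rfl
    · -- first quote at q
      rw [pvPrefix_single_drop] at hpre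
      have hqlt : q < s.length := (List.getElem?_eq_some_iff.mp hpre).1
      obtain ⟨hr1, hr2, hr3⟩ := pvBsRun_spec s q i hge
      set r := pvBsRun s i q with hrdef
      set b := q - r with hbdef
      have hnqb : ∀ j, i ≤ j → j < b → s[j]? ≠ some '"' := by
        intro j hj hjb hc
        exact hmin j hj (by omega) (pvPrefix_single_drop.mpr hc)
      have hib : pvInnerA s i = pvInnerA s b := by
        rcases hr3 with h | h
        · have : b = i := by omega
          rw [this]
        · exact pvCopy_scan s b (by omega) (Or.inr (by simpa using h)) (b - i) i le_rfl
            (by omega) hnqb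
      have hrun : pvInnerA s b =
          if (q - b) % 2 = 0 then pvQuoteStep s q else pvInnerA s (q + 1) :=
        pvRun_scan s q hqlt hpre (q - b) b le_rfl (by omega)
          (fun j hj hjq => hr2 j (by omega) hjq)
      have hqb : q - b = r := by omega
      rw [pvSkipB_eq_pos s i q hq, hib, hrun, hqb]
      have hih : pvInnerA s (q + 1) = pvSkipB s (q + 1) :=
        ih (q + 1) (by omega) (by omega)
      by_cases hpar : r % 2 = 1
      · rw [if_pos hpar, if_neg (by omega)]
        exact hih
      · rw [if_neg hpar, if_pos (by omega)]
        rcases pvClose_iff s q with ⟨ha, ht⟩ | ⟨ha, ht⟩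
        · rw [ha, ht, if_pos rfl]
        · rw [ha, ht]
          simp only [Bool.false_eq_true, if_false]
          exact hih

-- --- step lemmas for A's outer loop ----------------------------------------

-- guard of A's outer loop: the 8-char slice equals the marker iff marker is a prefix
theorem pvGuard_iff (s : List Char) (i : Nat) :
    PySem.List.slice s (some (i : Int)) (some ((i : Int) + 8)) = pvField ↔
      pvField <+: s.drop i := by
  have h8 : ((i : Int) + 8) = ((i + 8 : Nat) : Int) := by push_cast; ring
  rw [h8, PySem.List.slice_natCast]
  have hl : pvField.length = 8 := by decide
  have h88 : i + 8 - i = 8 := by omega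
  rw [h88]
  constructor
  · intro h
    rw [List.prefix_iff_eq_take, hl]
    exact h.symm
  · intro h
    rw [List.prefix_iff_eq_take, hl] at h
    exact h.symm

theorem pvOuterA_stop (s : List Char) (i : Nat) (h : s.length ≤ i) : pvOuterA s i = [] := by
  rw [pvOuterA, dif_neg (by omega)]

theorem pvOuterA_mark (s : List Char) (i : Nat) (h : i < s.length)
    (hg : pvField <+: s.drop i) :
    pvOuterA s i = pvBlank ++ pvOuterA s (pvInnerA s (i + 8)) := by
  conv_lhs => rw [pvOuterA]
  rw [dif_pos h, if_pos ((pvGuard_iff s i).mpr hg)]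

theorem pvOuterA_nomark (s : List Char) (i : Nat) (h : i < s.length)
    (hg : ¬ pvField <+: s.drop i) :
    pvOuterA s i = s[i] :: pvOuterA s (i + 1) := by
  conv_lhs => rw [pvOuterA]
  rw [dif_pos h, if_neg (fun hc => hg ((pvGuard_iff s i).mp hc))]

theorem pvOuterA_none (s : List Char) : ∀ d i, i ≤ s.length → s.length - i ≤ d →
    (∀ j, i ≤ j → ¬ pvField <+: s.drop j) → pvOuterA s i = s.drop i := by
  intro d
  induction d with
  | zero =>
    intro i hi hd _
    have : i = s.length := by omega
    rw [this, pvOuterA_stop s _ le_rfl, List.drop_length]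
  | succ d ih =>
    intro i hi hd hno
    by_cases h : i < s.length
    · rw [pvOuterA_nomark s i h (hno i le_rfl),
        ih (i + 1) (by omega) (by omega) (fun j hj => hno j (by omega)),
        List.drop_eq_getElem_cons h]
    · rw [pvOuterA_stop s i (by omega), List.drop_eq_nil_of_le (by omega)]

theorem pvOuterA_copy (s : List Char) (k : Nat) (hk : k ≤ s.length) :
    ∀ d p, k - p ≤ d → p ≤ k → (∀ j, p ≤ j → j < k → ¬ pvField <+: s.drop j) →
      pvOuterA s p = (s.drop p).take (k - p) ++ pvOuterA s k := by
  intro d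
  induction d with
  | zero =>
    intro p h1 h2 _
    have : p = k := by omega
    rw [this]
    simp
  | succ d ih =>
    intro p h1 h2 h3
    by_cases hpk : p = k
    · rw [hpk]; simp
    · have hpl : p < k := by omega
      have hpn : p < s.length := by omega
      rw [pvOuterA_nomark s p hpn (h3 p le_rfl hpl),
        ih (p + 1) (by omega) (by omega) (fun j hj hjk => h3 j (by omega) hjk)]
      rw [List.drop_eq_getElem_cons hpn]
      have : k - p = (k - (p + 1)) + 1 := by omega
      rw [this, List.take_succ_cons]
      rfl

-- --- unfolding pvOuterB one step -------------------------------------------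

theorem pvOuterB_eq_neg (s : List Char) (i : Nat)
    (hq : PySem.Chars.findFrom s pvField (i : Int) none = -1) :
    pvOuterB s i = s.drop i := by
  rw [pvOuterB]
  rw [hq, dif_pos rfl]
  rw [PySem.List.slice_from_natCast]

theorem pvOuterB_eq_pos (s : List Char) (i k : Nat)
    (hq : PySem.Chars.findFrom s pvField (i : Int) none = (k : Int)) :
    pvOuterB s i = (s.drop i).take (k - i) ++ pvBlank ++ pvOuterB s (pvSkipB s (k + 8)) := by
  rw [pvOuterB]
  rw [hq, dif_neg (by omega : ¬ (k : Int) = -1)]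
  rw [PySem.List.slice_natCast, Int.toNat_natCast]

-- --- the outer loops agree -------------------------------------------------

theorem pv_main_outer' (s : List Char) : ∀ d i, i ≤ s.length → s.length - i ≤ d →
    pvOuterA s i = pvOuterB s i := by
  intro d
  induction d with
  | zero =>
    intro i hi hd
    have hin : i = s.length := by omega
    subst hin
    rcases pvFindFrom_cases s pvField s.length le_rfl with ⟨hq, _⟩ | ⟨k, hq, hge, hpre, _⟩
    · rw [pvOuterB_eq_neg s _ hq, pvOuterA_stop s _ le_rfl, List.drop_length]
    · exfalso
      have := hpre.length_le
      simp [List.length_drop] at this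
      have h8 : pvField.length = 8 := by decide
      omega
  | succ d ih =>
    intro i hi hd
    rcases pvFindFrom_cases s pvField i hi with ⟨hq, hnone⟩ | ⟨k, hq, hge, hpre, hmin⟩
    · rw [pvOuterB_eq_neg s _ hq]
      exact pvOuterA_none s (s.length - i) i hi le_rfl (fun j hj => hnone j hj)
    · have h8 : pvField.length = 8 := by decide
      have hpl := hpre.length_le
      simp only [List.length_drop, h8] at hpl
      have hk8 : k + 8 ≤ s.length := by omega
      rw [pvOuterB_eq_pos s i k hq,
        pvOuterA_copy s k (by omega) (k - i) i le_rfl hge (fun j hj hjk => hmin j hj hjk),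
        pvOuterA_mark s k (by omega) hpre,
        pv_main_inner s s.length (k + 8) hk8 (by omega)]
      have hskge := pvSkipB_ge s (k + 8) hk8
      have hskle := pvSkipB_le s (k + 8)
      rw [ih (pvSkipB s (k + 8)) hskle (by omega)]
      simp [List.append_assoc]

theorem pv_main_outer (s : List Char) (i : Nat) (hi : i ≤ s.length) :
    pvOuterA s i = pvOuterB s i :=
  pv_main_outer' s (s.length - i) i hi le_rfl

-- ===== VERDICT (by name: the statement is the Claim_ definition above) =====
theorem strip_html_fields_py_spec : Claim_equal_strip_html_fields_py := by
  intro s _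
  unfold Spec_strip_html_fields_py strip_html_fields_py strip_html_fields_py_alt
  exact congrArg String.ofList (pv_main_outer s.toList 0 (Nat.zero_le _))
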